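-- pv_equiv track=rewrite | github.com/geschnee/dh_project | notebooks_and_code/my_utils.py | extract_artists_exact
-- ===== SOURCE A (Python) =====
-- def extract_artists_exact(prompt, artist_dict):
--     # artist_dict:
--     # key = artist copy_paste_name
--     # value = artist names and pseudonyms as list
--
--     artists = []
--     prompt = prompt.lower()
--
--     for cp_name, aliases in artist_dict.items():
--         for name in aliases:
--             if name.lower() in prompt:
--                 artists.append(cp_name)
--                 continue
--
--     return artists
-- ===== SOURCE B (Python) =====
-- def extract_artists_exact(prompt, artist_dict):
--     p = prompt.lower()
--     # phase 1: decide 'in prompt' once per DISTINCT lowered alias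
--     match = {}
--     for aliases in artist_dict.values():
--         for name in aliases:
--             low = name.lower()
--             if low not in match:
--                 match[low] = low in p
--     # phase 2: emit cp_name once per matching alias, no substring scans here
--     return [cp_name for cp_name, aliases in artist_dict.items()
--             for name in aliases if match[name.lower()]]
-- ===== Notes on version B (the rewrite author's own statement) =====
-- stated objective: alternative
-- what changed: A decides 'alias in prompt' inside the nested append loop, rescanning the prompt for every alias occurrence; B first builds a dict mapping each distinct lowered alias to its one substring test, then emits artists in a scan-free pass over the dict, so duplicate aliases are tested once.
import Mathlib
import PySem

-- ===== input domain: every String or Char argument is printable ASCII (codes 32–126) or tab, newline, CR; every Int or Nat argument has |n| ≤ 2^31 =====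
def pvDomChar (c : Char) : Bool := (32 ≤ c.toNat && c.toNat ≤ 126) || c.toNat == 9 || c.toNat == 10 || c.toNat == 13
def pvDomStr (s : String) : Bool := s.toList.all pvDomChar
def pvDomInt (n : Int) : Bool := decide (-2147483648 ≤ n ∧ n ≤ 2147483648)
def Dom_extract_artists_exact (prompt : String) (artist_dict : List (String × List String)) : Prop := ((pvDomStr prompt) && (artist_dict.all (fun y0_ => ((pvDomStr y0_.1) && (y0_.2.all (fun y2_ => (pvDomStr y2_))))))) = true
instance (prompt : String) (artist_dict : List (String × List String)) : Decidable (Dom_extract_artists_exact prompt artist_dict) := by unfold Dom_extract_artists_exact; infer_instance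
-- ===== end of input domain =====

-- B replaces A's scan-per-alias-occurrence nested loop by a two-phase pass: first a dict
-- caching the substring test once per distinct lowered alias, then a scan-free emission pass.

-- ===== PORT A =====
def extract_artists_exact (prompt : String) (artist_dict : List (String × List String)) : List String :=
  let p := PySem.Str.lower prompt
  artist_dict.foldl
    (fun artists e =>
      e.2.foldl
        (fun artists name =>
          if PySem.Str.isIn (PySem.Str.lower name) p then artists ++ [e.1] else artists)
        artists)
    []

-- ===== PORT B =====
-- phase 1 of Source B: 'if low not in match: match[low] = low in p', folded over all aliases
def pvStep (p : String) (m : PySem.Dict String Bool) (name : String) : PySem.Dict String Bool :=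
  let low := PySem.Str.lower name
  if m.contains low then m else m.insert low (PySem.Str.isIn low p)

def pvBuild (p : String) (artist_dict : List (String × List String)) : PySem.Dict String Bool :=
  artist_dict.foldl (fun m e => e.2.foldl (pvStep p) m) PySem.Dict.empty

def extract_artists_exact_alt (prompt : String) (artist_dict : List (String × List String)) : List String :=
  let p := PySem.Str.lower prompt
  let m := pvBuild p artist_dict
  -- 'match[name.lower()]': the key is always present (phase 1 inserted it); default false is never used
  artist_dict.flatMap
    (fun e => (e.2.filter (fun name => m.getD (PySem.Str.lower name) false)).map (fun _ => e.1))

-- ===== PRECONDITION & SPEC =====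
def Spec_extract_artists_exact (prompt : String) (artist_dict : List (String × List String)) (out : List String) : Prop := out = extract_artists_exact_alt prompt artist_dict
instance (prompt : String) (artist_dict : List (String × List String)) (out : List String) : Decidable (Spec_extract_artists_exact prompt artist_dict out) := by unfold Spec_extract_artists_exact; infer_instance

-- ===== CLAIM (what is proved, stated in full; the proofs are below) =====
def Claim_equal_extract_artists_exact : Prop := ∀ (prompt : String) (artist_dict : List (String × List String)), Dom_extract_artists_exact prompt artist_dict → Spec_extract_artists_exact prompt artist_dict (extract_artists_exact prompt artist_dict)

-- ===== LEMMAS AND PROOFS =====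

-- A's inner loop over one entry's aliases: append e.1 once per matching alias
theorem pv_inner (p cp : String) (al : List String) (acc : List String) :
    al.foldl (fun a n => if PySem.Str.isIn (PySem.Str.lower n) p then a ++ [cp] else a) acc
      = acc ++ (al.filter (fun n => PySem.Str.isIn (PySem.Str.lower n) p)).map (fun _ => cp) := by
  induction al generalizing acc with
  | nil => simp
  | cons h t ih =>
    rw [List.foldl_cons, List.filter_cons]
    by_cases hh : PySem.Str.isIn (PySem.Str.lower h) p = true
    · rw [if_pos hh, if_pos hh, ih, List.map_cons]
      simp
    · rw [if_neg hh, if_neg hh, ih]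

-- A as a flatMap
theorem pv_A_eq (prompt : String) (d : List (String × List String)) :
    extract_artists_exact prompt d
      = d.flatMap (fun e =>
          (e.2.filter (fun n => PySem.Str.isIn (PySem.Str.lower n) (PySem.Str.lower prompt))).map
            (fun _ => e.1)) := by
  rw [extract_artists_exact]
  have haux : ∀ (t : List (String × List String)) (acc : List String),
      t.foldl (fun artists e =>
          e.2.foldl (fun a n => if PySem.Str.isIn (PySem.Str.lower n) (PySem.Str.lower prompt)
                                then a ++ [e.1] else a) artists) acc
        = acc ++ t.flatMap (fun e =>
            (e.2.filter (fun n => PySem.Str.isIn (PySem.Str.lower n) (PySem.Str.lower prompt))).map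
              (fun _ => e.1)) := by
    intro t
    induction t with
    | nil => simp
    | cons e t ih =>
      intro acc
      rw [List.foldl_cons, pv_inner, ih, List.flatMap_cons, List.append_assoc]
  rw [haux d []]
  rw [List.nil_append]

-- the memo dict only ever stores the true substring-test value of its key
def pvGood (p : String) (m : PySem.Dict String Bool) : Prop :=
  ∀ k v, m.get? k = some v → v = PySem.Str.isIn k p

theorem pv_good_step (p : String) (m : PySem.Dict String Bool) (name : String)
    (h : pvGood p m) : pvGood p (pvStep p m name) := by
  intro k v hkv
  rw [pvStep] at hkv
  by_cases hc : m.contains (PySem.Str.lower name) = true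
  · rw [if_pos hc] at hkv; exact h k v hkv
  · rw [if_neg hc, PySem.Dict.get?_insert] at hkv
    by_cases hk : k = PySem.Str.lower name
    · rw [if_pos hk] at hkv
      rw [hk]
      exact (Option.some.inj hkv).symm
    · rw [if_neg hk] at hkv; exact h k v hkv

theorem pv_contains_step_mono (p : String) (m : PySem.Dict String Bool) (name k : String)
    (h : m.contains k = true) : (pvStep p m name).contains k = true := by
  rw [pvStep]
  by_cases hc : m.contains (PySem.Str.lower name) = true
  · rw [if_pos hc]; exact h
  · rw [if_neg hc, PySem.Dict.contains_insert, h, Bool.or_true]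

theorem pv_contains_step_self (p : String) (m : PySem.Dict String Bool) (name : String) :
    (pvStep p m name).contains (PySem.Str.lower name) = true := by
  rw [pvStep]
  by_cases hc : m.contains (PySem.Str.lower name) = true
  · rw [if_pos hc]; exact hc
  · rw [if_neg hc]; exact PySem.Dict.contains_insert_self _ _ _

theorem pv_good_inner (p : String) (al : List String) (m : PySem.Dict String Bool)
    (h : pvGood p m) : pvGood p (al.foldl (pvStep p) m) := by
  induction al generalizing m with
  | nil => exact h
  | cons a t ih => exact ih (pvStep p m a) (pv_good_step p m a h)

theorem pv_contains_inner_mono (p : String) (al : List String) (m : PySem.Dict String Bool)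
    (k : String) (h : m.contains k = true) : (al.foldl (pvStep p) m).contains k = true := by
  induction al generalizing m with
  | nil => exact h
  | cons a t ih => exact ih (pvStep p m a) (pv_contains_step_mono p m a k h)

theorem pv_contains_inner (p : String) (al : List String) (name : String) (h : name ∈ al)
    (m : PySem.Dict String Bool) :
    ((al.foldl (pvStep p) m).contains (PySem.Str.lower name)) = true := by
  induction al generalizing m with
  | nil => simp at h
  | cons a t ih =>
    rcases List.mem_cons.mp h with rfl | ht
    · exact pv_contains_inner_mono p t (pvStep p m name) (PySem.Str.lower name)
        (pv_contains_step_self p m name)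
    · exact ih ht (pvStep p m a)

theorem pv_contains_outer_mono (p : String) (d : List (String × List String))
    (m : PySem.Dict String Bool) (k : String) (h : m.contains k = true) :
    ((d.foldl (fun m e => e.2.foldl (pvStep p) m) m).contains k) = true := by
  induction d generalizing m with
  | nil => exact h
  | cons e t ih => exact ih _ (pv_contains_inner_mono p e.2 m k h)

theorem pv_good_build_aux (p : String) (d : List (String × List String))
    (m : PySem.Dict String Bool) (h : pvGood p m) :
    pvGood p (d.foldl (fun m e => e.2.foldl (pvStep p) m) m) := by
  induction d generalizing m with
  | nil => exact h
  | cons e t ih => exact ih _ (pv_good_inner p e.2 m h)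

theorem pv_contains_build_aux (p : String) (d : List (String × List String))
    (m : PySem.Dict String Bool) (e : String × List String) (name : String)
    (he : e ∈ d) (hn : name ∈ e.2) :
    ((d.foldl (fun m e => e.2.foldl (pvStep p) m) m).contains (PySem.Str.lower name)) = true := by
  induction d generalizing m with
  | nil => simp at he
  | cons x t ih =>
    rw [List.foldl_cons]
    rcases List.mem_cons.mp he with heq | ht
    · exact pv_contains_outer_mono p t _ _ (pv_contains_inner p x.2 name (heq ▸ hn) m)
    · exact ih _ ht

theorem pv_getD_build (p : String) (d : List (String × List String))
    (e : String × List String) (name : String) (he : e ∈ d) (hn : name ∈ e.2) :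
    (pvBuild p d).getD (PySem.Str.lower name) false
      = PySem.Str.isIn (PySem.Str.lower name) p := by
  have hc : (pvBuild p d).contains (PySem.Str.lower name) = true :=
    pv_contains_build_aux p d PySem.Dict.empty e name he hn
  have hg : pvGood p (pvBuild p d) :=
    pv_good_build_aux p d PySem.Dict.empty (fun k v hkv => by simp at hkv)
  rw [PySem.Dict.contains_eq_isSome_get?] at hc
  rcases ho : (pvBuild p d).get? (PySem.Str.lower name) with _ | v
  · rw [ho] at hc; simp at hc
  · rw [PySem.Dict.getD_eq_get?_getD, ho, Option.getD_some, hg _ v ho]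

-- ===== VERDICT (by name: the statement is the Claim_ definition above) =====
theorem extract_artists_exact_spec : Claim_equal_extract_artists_exact := by
  intro prompt d _
  rw [Spec_extract_artists_exact, pv_A_eq, extract_artists_exact_alt]
  refine (List.flatMap_congr ?_).symm
  intro e he
  congr 1
  refine List.filter_congr ?_
  intro name hn
  exact pv_getD_build (PySem.Str.lower prompt) d e name he hn
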